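-- pv_equiv track=rewrite | github.com/NgWeiErn/Questions_1 | q7.py | operations_comb
-- ===== SOURCE A (Python) =====
-- import itertools
--
-- def unique_permutations(r, d):
--     """Create generator containing all unique permutations with `r` R'es and `D` D's."""
--     total = r + d
--     for indices in itertools.combinations(range(total), d):
--         lst = ['R']*total
--         for index in indices:
--             lst[index] = 'D'
--         yield lst
--
-- def operations_comb(mat, target):
--
--     m = len(mat)
--     n = len(mat[0])
--     unique_perm = unique_permutations(m-1,n-1)
--     list_paths = []
--
--     for ls in unique_perm:
--         list_num = []
--         list_num.append(mat[0][0])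
--         sum = mat[0][0]
--         i = 0
--         j = 0
--         for char in ls:
--             if char == 'D':
--                 i += 1
--                 sum += mat[i][j]
--                 list_num.append(mat[i][j])
--             elif char == 'R':
--                 j += 1
--                 sum += mat[i][j]
--                 list_num.append(mat[i][j])
--         if sum == target:
--             list_paths.append(ls)
--
--     return list_paths
-- ===== SOURCE B (Python) =====
-- def operations_comb(mat, target):
--     # mat is a square grid: n rows of n values each.
--     n = len(mat)
--     res = []
--
--     def dfs(i, j, s, path):
--         if i == n - 1 and j == n - 1:
--             if s == target:
--                 res.append(path)
--             return
--         if i < n - 1: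
--             dfs(i + 1, j, s + mat[i + 1][j], path + ['D'])
--         if j < n - 1:
--             dfs(i, j + 1, s + mat[i][j + 1], path + ['R'])
--
--     dfs(0, 0, mat[0][0], [])
--     return res
-- ===== Notes on version B (the rewrite author's own statement) =====
-- stated objective: alternative
-- what changed: B replaces A's itertools.combinations enumeration (materialise each D/R move list from index tuples, then re-walk the grid per path) by a recursive DFS over the square n x n grid carrying (i,j), the running sum and the move list, branching Down before Right so paths come out in the same lexicographic order; Pre_ excludes empty, ragged and non-square grids, on which A raises IndexError (its Down/Right move counts are swapped between the two dimensions, so any non-square walk runs off the grid).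
import Mathlib
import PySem

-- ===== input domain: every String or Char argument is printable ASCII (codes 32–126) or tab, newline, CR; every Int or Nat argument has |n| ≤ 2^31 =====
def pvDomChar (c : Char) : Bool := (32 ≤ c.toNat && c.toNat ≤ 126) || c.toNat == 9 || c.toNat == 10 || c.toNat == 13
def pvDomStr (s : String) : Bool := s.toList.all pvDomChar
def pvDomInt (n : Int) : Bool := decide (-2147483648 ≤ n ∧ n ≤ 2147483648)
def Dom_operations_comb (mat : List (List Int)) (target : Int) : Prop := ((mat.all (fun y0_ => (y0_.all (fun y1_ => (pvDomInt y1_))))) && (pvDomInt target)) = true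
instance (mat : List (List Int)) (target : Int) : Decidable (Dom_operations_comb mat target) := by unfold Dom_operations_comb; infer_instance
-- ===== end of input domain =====

-- B replaces A's combinations-then-rewalk enumeration by a recursive DFS over the grid
-- (Down before Right, carrying the running sum), producing the same paths in the same order.

-- ===== PORT A =====
-- unique_permutations(m-1, n-1): build each move list from a combination of D-positions.
-- itertools.combinations(range(total), d) is PySem.List.combinations (CPython order).
def markD_A (total : Nat) (idxs : List Nat) : List String :=
  idxs.foldl (fun l idx => l.set idx "D") (List.replicate total "R")

-- one step of A's inner walk over the move list; state = (sum, i, j).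
-- Indices only ever grow from 0, so plain getD indexing is exact on Pre_ (all in range);
-- A's write-only local list_num is dropped (it never influences the result).
def stepA (mat : List (List Int)) (st : Int × Nat × Nat) (c : String) : Int × Nat × Nat :=
  if c = "D" then
    (st.1 + ((mat.getD (st.2.1 + 1) []).getD st.2.2 0), st.2.1 + 1, st.2.2)
  else if c = "R" then
    (st.1 + ((mat.getD st.2.1 []).getD (st.2.2 + 1) 0), st.2.1, st.2.2 + 1)
  else st

def operations_comb (mat : List (List Int)) (target : Int) : List (List String) :=
  let m := mat.length
  let n := (mat.headD []).length
  let total := (m - 1) + (n - 1)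
  let unique_perm := (PySem.List.combinations (List.range total) (n - 1)).map (markD_A total)
  unique_perm.foldl (fun list_paths ls =>
    let a00 := (mat.headD []).headD 0
    let st := ls.foldl (stepA mat) (a00, 0, 0)
    if st.1 = target then list_paths ++ [ls] else list_paths) []

-- ===== PORT B =====
-- recursive DFS over the square n x n grid (n = len(mat); Source B never reads a row
-- length) from (i, j) with running sum s and move list path; 'D' tried before 'R'.
-- The fuel parameter (started at n + n, more than any path length) only guards
-- totality; indices only grow from 0, so getD indexing is exact on the admitted inputs.
def dfsB (mat : List (List Int)) (target : Int) (n : Nat) :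
    Nat → Nat → Nat → Int → List String → List (List String)
  | 0, _, _, _, _ => []
  | fuel + 1, i, j, s, path =>
    if i = n - 1 ∧ j = n - 1 then (if s = target then [path] else [])
    else
      (if i < n - 1 then
        dfsB mat target n fuel (i + 1) j (s + ((mat.getD (i + 1) []).getD j 0)) (path ++ ["D"])
       else []) ++
      (if j < n - 1 then
        dfsB mat target n fuel i (j + 1) (s + ((mat.getD i []).getD (j + 1) 0)) (path ++ ["R"])
       else [])

def operations_comb_alt (mat : List (List Int)) (target : Int) : List (List String) :=
  dfsB mat target mat.length (mat.length + mat.length) 0 0 ((mat.headD []).headD 0) []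

-- ===== PRECONDITION & SPEC =====
-- Pre_ excludes empty, ragged and non-square grids: A takes n-1 Down and m-1 Right
-- moves (counts swapped between the row count m and first-row length n), so on any
-- non-square grid some walk indexes off the grid and A raises IndexError (ValueError
-- when n = 0); A returns normally exactly on grids whose first row has m entries and
-- whose every row has at least m entries.
def Pre_operations_comb (mat : List (List Int)) (target : Int) : Prop :=
  mat ≠ [] ∧ (mat.headD []).length = mat.length ∧ ∀ row ∈ mat, mat.length ≤ row.length
instance (mat : List (List Int)) (target : Int) : Decidable (Pre_operations_comb mat target) := by
  unfold Pre_operations_comb; infer_instance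

def pvWitness_operations_comb : List (List Int) × Int := ([[1, 2, 3], [4, 5, 6], [7, 8, 9]], 21)

def Spec_operations_comb (mat : List (List Int)) (target : Int) (out : List (List String)) : Prop :=
  out = operations_comb_alt mat target
instance (mat : List (List Int)) (target : Int) (out : List (List String)) : Decidable (Spec_operations_comb mat target out) := by
  unfold Spec_operations_comb; infer_instance

-- ===== CLAIM (what is proved, stated in full; the proofs are below) =====
def Claim_equal_operations_comb : Prop := ∀ (mat : List (List Int)) (target : Int), Dom_operations_comb mat target → Pre_operations_comb mat target → Spec_operations_comb mat target (operations_comb mat target)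
-- ===== LEMMAS AND PROOFS =====

-- all D/R move sequences with d Downs and r Rights, in lexicographic order (D < R)
def seqs : Nat → Nat → List (List String)
  | 0, 0 => [[]]
  | 0, r + 1 => (seqs 0 r).map (fun l => "R" :: l)
  | d + 1, 0 => (seqs d 0).map (fun l => "D" :: l)
  | d + 1, r + 1 => (seqs d (r + 1)).map (fun l => "D" :: l) ++ (seqs (d + 1) r).map (fun l => "R" :: l)
termination_by d r => d + r

def toSeq (t : Nat) (idxs : List Nat) : List String :=
  (List.range t).map (fun p => if p ∈ idxs then "D" else "R")

-- sum of the cells visited after (i, j) along a move sequence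
def wsum (mat : List (List Int)) : Nat → Nat → List String → Int
  | _, _, [] => 0
  | i, j, c :: cs =>
    if c = "D" then ((mat.getD (i + 1) []).getD j 0) + wsum mat (i + 1) j cs
    else if c = "R" then ((mat.getD i []).getD (j + 1) 0) + wsum mat i (j + 1) cs
    else wsum mat i j cs

lemma foldA_fst (mat : List (List Int)) (ls : List String) :
    ∀ (s : Int) (i j : Nat), (ls.foldl (stepA mat) (s, i, j)).1 = s + wsum mat i j ls := by
  induction ls with
  | nil => intro s i j; simp [wsum]
  | cons c cs ih =>
    intro s i j
    by_cases hD : c = "D"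
    · simp [List.foldl, stepA, hD, wsum, ih, add_assoc]
    · by_cases hR : c = "R"
      · simp [List.foldl, stepA, hD, hR, wsum, ih, add_assoc]
      · simp [List.foldl, stepA, hD, hR, wsum, ih]

lemma foldl_set_getElem? (idxs : List Nat) :
    ∀ (init : List String) (p : Nat),
      (idxs.foldl (fun l idx => l.set idx "D") init)[p]? =
        if p ∈ idxs ∧ p < init.length then some "D" else init[p]? := by
  induction idxs with
  | nil => intro init p; simp
  | cons x xs ih =>
    intro init p
    simp only [List.foldl_cons]
    rw [ih]
    by_cases hx : p ∈ xs
    · by_cases hlt : p < init.length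
      · simp [hx, hlt, List.length_set]
      · simp [hx, hlt, List.length_set, List.getElem?_eq_none (not_lt.1 hlt),
          List.getElem?_eq_none (le_trans (le_of_eq (List.length_set ..)) (not_lt.1 hlt))]
    · by_cases hpx : p = x
      · subst hpx
        by_cases hlt : p < init.length
        · simp [hx, hlt, List.length_set, List.getElem?_set_self]
        · simp [hx, hlt, List.length_set, List.getElem?_eq_none (not_lt.1 hlt),
            List.getElem?_eq_none (le_trans (le_of_eq (List.length_set ..)) (not_lt.1 hlt))]
      · simp [hx, hpx, List.length_set, List.getElem?_set_ne (fun h => hpx h.symm)]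

lemma toSeq_length (t : Nat) (idxs : List Nat) : (toSeq t idxs).length = t := by
  simp [toSeq]

lemma markD_eq_toSeq (t : Nat) (idxs : List Nat) (h : ∀ a ∈ idxs, a < t) :
    markD_A t idxs = toSeq t idxs := by
  apply List.ext_getElem?
  intro p
  rw [show (markD_A t idxs)[p]? =
      if p ∈ idxs ∧ p < t then some "D" else (List.replicate t "R")[p]? by
    simpa [markD_A] using foldl_set_getElem? idxs (List.replicate t "R") p]
  by_cases hpt : p < t
  · by_cases hp : p ∈ idxs <;> simp [toSeq, hp, hpt, List.getElem?_replicate]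
  · have hp : p ∉ idxs := fun hmem => hpt (h p hmem)
    have h1 : (List.replicate t "R")[p]? = none :=
      List.getElem?_eq_none (by simpa using not_lt.1 hpt)
    have h2 : (toSeq t idxs)[p]? = none :=
      List.getElem?_eq_none (by rw [toSeq_length]; exact not_lt.1 hpt)
    simp [hp, h1, h2]

lemma toSeq_cons_zero (t : Nat) (zs : List Nat) :
    toSeq (t + 1) (0 :: zs.map Nat.succ) = "D" :: toSeq t zs := by
  simp only [toSeq, List.range_succ_eq_map, List.map_cons, List.map_map]
  refine congrArg₂ List.cons (by simp) ?_
  apply List.map_congr_left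
  intro p _
  simp [Function.comp, Nat.succ_ne_zero, Nat.succ_inj]

lemma toSeq_map_succ (t : Nat) (zs : List Nat) :
    toSeq (t + 1) (zs.map Nat.succ) = "R" :: toSeq t zs := by
  simp only [toSeq, List.range_succ_eq_map, List.map_cons, List.map_map]
  refine congrArg₂ List.cons (by simp) ?_
  apply List.map_congr_left
  intro p _
  simp [Function.comp, Nat.succ_inj]

lemma seqs_zero_left (r : Nat) : seqs 0 r = [List.replicate r "R"] := by
  induction r with
  | zero => simp [seqs]
  | succ r ih => simp [seqs, ih, List.replicate_succ]

lemma combos_toSeq (t : Nat) :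
    ∀ k, k ≤ t →
      (PySem.List.combinations (List.range t) k).map (toSeq t) = seqs k (t - k) := by
  induction t with
  | zero =>
    intro k hk
    interval_cases k
    simp [PySem.List.combinations_zero, toSeq, seqs]
  | succ t ih =>
    intro k hk
    cases k with
    | zero =>
      simp [PySem.List.combinations_zero, seqs_zero_left, toSeq,
        List.eq_replicate_iff, List.mem_map]
    | succ k =>
      rw [List.range_succ_eq_map, PySem.List.combinations_cons_succ,
        PySem.List.combinations_map, PySem.List.combinations_map, List.map_append]
      simp only [List.map_map, Function.comp_def]
      rw [List.map_congr_left (l := PySem.List.combinations (List.range t) k)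
            (g := fun c => "D" :: toSeq t c) (fun c _ => toSeq_cons_zero t c),
          List.map_congr_left (l := PySem.List.combinations (List.range t) (k + 1))
            (g := fun c => "R" :: toSeq t c) (fun c _ => toSeq_map_succ t c)]
      rw [show (fun c => "D" :: toSeq t c) = (fun l => ("D" : String) :: l) ∘ toSeq t from rfl,
          show (fun c => "R" :: toSeq t c) = (fun l => ("R" : String) :: l) ∘ toSeq t from rfl,
          ← List.map_map, ← List.map_map]
      by_cases hkt : k + 1 ≤ t
      · rw [ih k (by omega), ih (k + 1) hkt]
        have hr : t - k = (t - (k + 1)) + 1 := by omega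
        rw [show t + 1 - (k + 1) = t - k from by omega, hr]
        simp [seqs]
      · have hkt' : k = t := by omega
        subst hkt'
        rw [ih k (le_refl k),
          PySem.List.combinations_eq_nil_of_length_lt
            (xs := List.range k) (r := k + 1) (by simpa using Nat.lt_succ_self k)]
        simp [seqs, Nat.sub_self]

-- one DFS branch: pushing the filter/map through the "move ch" prefix
lemma branch_eq (mat : List (List Int)) (target : Int) (i j i' j' : Nat) (s cell : Int)
    (acc : List String) (ch : String) (L : List (List String))
    (hw : ∀ ls, wsum mat i j (ch :: ls) = cell + wsum mat i' j' ls) :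
    (List.filter (fun ls => decide (s + cell + wsum mat i' j' ls = target)) L).map
        (fun ls => (acc ++ [ch]) ++ ls) =
      ((L.map (fun l => ch :: l)).filter (fun ls => decide (s + wsum mat i j ls = target))).map
        (fun ls => acc ++ ls) := by
  rw [List.filter_map, List.map_map,
    List.filter_congr (l := L)
      (p := fun ls => decide (s + cell + wsum mat i' j' ls = target))
      (q := (fun ls => decide (s + wsum mat i j ls = target)) ∘ (fun l => ch :: l))
      (fun ls _ => by simp [Function.comp, hw, add_assoc])]
  apply List.map_congr_left
  intro ls _
  simp [Function.comp]

lemma dfsB_base (mat : List (List Int)) (target : Int) (n fuel : Nat) (s : Int)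
    (acc : List String) :
    dfsB mat target n (fuel + 1) (n - 1) (n - 1) s acc =
      ((seqs 0 0).filter (fun ls => decide (s + wsum mat (n - 1) (n - 1) ls = target))).map
        (fun ls => acc ++ ls) := by
  rw [dfsB, if_pos ⟨rfl, rfl⟩]
  by_cases h : s = target <;> simp [seqs, wsum, List.filter, h]

lemma dfsB_eq (mat : List (List Int)) (target : Int) (n : Nat) :
    ∀ (fuel i j : Nat) (s : Int) (acc : List String),
      (n - 1 - i) + (n - 1 - j) < fuel → i ≤ n - 1 → j ≤ n - 1 →
      dfsB mat target n fuel i j s acc =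
        ((seqs (n - 1 - i) (n - 1 - j)).filter
          (fun ls => decide (s + wsum mat i j ls = target))).map (fun ls => acc ++ ls) := by
  intro fuel
  induction fuel with
  | zero => intro i j s acc hf _ _; omega
  | succ fuel ih =>
    intro i j s acc hf hi hj
    by_cases hbase : i = n - 1 ∧ j = n - 1
    · obtain ⟨h1, h2⟩ := hbase
      subst h1; subst h2
      rw [Nat.sub_self]
      exact dfsB_base mat target n fuel s acc
    · rw [dfsB, if_neg hbase]
      rcases Nat.lt_or_ge i (n - 1) with hiL | hiG
      · rcases Nat.lt_or_ge j (n - 1) with hjL | hjG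
        · have e1 : n - 1 - i = (n - 1 - (i + 1)) + 1 := by omega
          have e2 : n - 1 - j = (n - 1 - (j + 1)) + 1 := by omega
          rw [if_pos hiL, if_pos hjL,
            ih (i + 1) j _ _ (by omega) (by omega) hj,
            ih i (j + 1) _ _ (by omega) hi (by omega),
            e1, e2]
          simp only [seqs, List.filter_append, List.map_append]
          refine congrArg₂ (· ++ ·) ?_ ?_
          · rw [← e2]
            exact branch_eq mat target i j (i + 1) j s _ acc "D" _ (fun ls => by simp [wsum])
          · rw [← e1]
            exact branch_eq mat target i j i (j + 1) s _ acc "R" _ (fun ls => by simp [wsum])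
        · have h2 : j = n - 1 := by omega
          subst h2
          have e1 : n - 1 - i = (n - 1 - (i + 1)) + 1 := by omega
          rw [if_pos hiL, if_neg (by omega),
            ih (i + 1) (n - 1) _ _ (by omega) (by omega) (le_refl _),
            e1, Nat.sub_self]
          simp only [seqs, List.filter_append, List.map_append, List.append_nil]
          exact branch_eq mat target i (n - 1) (i + 1) (n - 1) s _ acc "D" _
            (fun ls => by simp [wsum])
      · have h1 : i = n - 1 := by omega
        subst h1
        have hjL : j < n - 1 := by omega
        have e2 : n - 1 - j = (n - 1 - (j + 1)) + 1 := by omega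
        rw [if_neg (by omega), if_pos hjL,
          ih (n - 1) (j + 1) _ _ (by omega) (le_refl _) (by omega),
          e2, Nat.sub_self]
        simp only [seqs, List.filter_append, List.map_append, List.nil_append]
        exact branch_eq mat target (n - 1) j (n - 1) (j + 1) s _ acc "R" _
          (fun ls => by simp [wsum])

lemma combos_mem_lt (t k : Nat) (c : List Nat)
    (hc : c ∈ PySem.List.combinations (List.range t) k) : ∀ a ∈ c, a < t := by
  intro a ha
  have hsub := PySem.List.sublist_of_mem_combinations hc
  exact List.mem_range.1 (hsub.subset ha)

-- ===== VERDICT (by name: the statement is the Claim_ definition above) =====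
theorem operations_comb_spec : Claim_equal_operations_comb := by
  intro mat target _ hpre
  obtain ⟨hne, hsq, hrows⟩ := hpre
  have hm1 : 1 ≤ mat.length := List.length_pos_iff.2 hne
  simp only [Spec_operations_comb, operations_comb, operations_comb_alt]
  rw [PySem.List.foldl_append_ite_eq_filter
        (fun ls => (ls.foldl (stepA mat) (((mat.headD []).headD 0), 0, 0)).1 = target)
        ((PySem.List.combinations
            (List.range ((mat.length - 1) + ((mat.headD []).length - 1)))
            ((mat.headD []).length - 1)).map
          (markD_A ((mat.length - 1) + ((mat.headD []).length - 1)))) [],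
      List.nil_append]
  rw [List.map_congr_left (fun c hc => markD_eq_toSeq _ c (combos_mem_lt _ _ c hc)),
      combos_toSeq ((mat.length - 1) + ((mat.headD []).length - 1)) ((mat.headD []).length - 1)
        (by omega),
      show (mat.length - 1) + ((mat.headD []).length - 1) - ((mat.headD []).length - 1)
        = mat.length - 1 from by omega]
  rw [List.filter_congr (fun ls _ => by rw [foldA_fst])]
  rw [hsq]
  rw [dfsB_eq mat target mat.length
        (mat.length + mat.length) 0 0 ((mat.headD []).headD 0) []
        (by omega) (by omega) (by omega)]
  simp
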